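-- pv_equiv track=rewrite | github.com/TUIHackfridays/tuise-bot | commands/ai_puzzle_solver/puzzle_solver.py | validate_puzzle
-- ===== SOURCE A (Python) =====
-- def validate_puzzle(puz):
--     values = []
--     max_val = (len(puz[0]) * len(puz)) - 1 # number of pieces with blank removed
--     for line in puz:
--         for elem in  line:
--             if elem in values or elem > max_val:
--                 return False
--             else:
--                 values.append(elem)
--                 values = sorted(values)
--     return True
-- ===== SOURCE B (Python) =====
-- def validate_puzzle(puz):
--     max_val = (len(puz[0]) * len(puz)) - 1  # number of pieces with blank removed
--     flat = [e for row in puz for e in row]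
--     return len(flat) == len(set(flat)) and all(e <= max_val for e in flat)
-- ===== Notes on version B (the rewrite author's own statement) =====
-- stated objective: simpler
-- what changed: Replaces the per-element short-circuit loop that maintains and re-sorts a 'values' list with a single flatten followed by two aggregate checks: uniqueness via len(flat)==len(set(flat)) and the bound via all(e <= max_val).
import Mathlib
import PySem

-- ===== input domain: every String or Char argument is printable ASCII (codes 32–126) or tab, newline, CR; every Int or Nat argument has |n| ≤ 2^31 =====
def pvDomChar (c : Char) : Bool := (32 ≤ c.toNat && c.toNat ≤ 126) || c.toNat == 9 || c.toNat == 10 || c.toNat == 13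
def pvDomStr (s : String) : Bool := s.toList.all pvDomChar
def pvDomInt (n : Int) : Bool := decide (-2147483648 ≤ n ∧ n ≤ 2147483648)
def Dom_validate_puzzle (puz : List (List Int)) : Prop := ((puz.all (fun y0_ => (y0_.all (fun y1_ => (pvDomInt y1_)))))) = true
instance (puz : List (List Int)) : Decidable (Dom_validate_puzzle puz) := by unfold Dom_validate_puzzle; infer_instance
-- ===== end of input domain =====

-- B replaces A's element-by-element short-circuit loop (with a re-sorted 'values' accumulator)
-- by one flatten plus two aggregate checks (len==len(set) and all(<= max_val)): simpler decomposition.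


-- ===== PORT A =====
-- inner 'for elem in line' loop: returns none on 'return False', otherwise the updated values
def vpA_inner (values : List Int) (m : Int) : List Int → Option (List Int)
  | [] => some values
  | e :: rest =>
    if values.contains e || decide (e > m) then none
    else vpA_inner (PySem.List.sorted (values ++ [e]) (fun x => x) false) m rest

-- outer 'for line in puz' loop
def vpA_outer (values : List Int) (m : Int) : List (List Int) → Bool
  | [] => true
  | line :: rest =>
    match vpA_inner values m line with
    | none => false
    | some v => vpA_outer v m rest

def validate_puzzle (puz : List (List Int)) : Bool :=
  match puz with
  | [] => false  -- Python: puz[0] raises IndexError here; excluded by Pre_validate_puzzle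
  | first :: _ =>
    let max_val : Int := (first.length : Int) * (puz.length : Int) - 1
    vpA_outer [] max_val puz

-- ===== PORT B =====
def validate_puzzle_alt (puz : List (List Int)) : Bool :=
  match puz with
  | [] => false  -- Python: puz[0] raises IndexError here; excluded by Pre_validate_puzzle
  | first :: _ =>
    let max_val : Int := (first.length : Int) * (puz.length : Int) - 1
    let flat : List Int := puz.foldl (fun acc row => acc ++ row) []
    (flat.length == (PySem.Set.ofList flat).length) && flat.all (fun e => decide (e ≤ max_val))

-- ===== PRECONDITION & SPEC =====
-- Pre_ excludes only the empty list, on which A (and B) raise IndexError at puz[0].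
def Pre_validate_puzzle (puz : List (List Int)) : Prop := puz ≠ []
instance (puz : List (List Int)) : Decidable (Pre_validate_puzzle puz) := by unfold Pre_validate_puzzle; infer_instance
def pvWitness_validate_puzzle : List (List Int) := [[0, 1], [2, 3]]
def Spec_validate_puzzle (puz : List (List Int)) (out : Bool) : Prop := out = validate_puzzle_alt puz
instance (puz : List (List Int)) (out : Bool) : Decidable (Spec_validate_puzzle puz out) := by unfold Spec_validate_puzzle; infer_instance

-- ===== CLAIM (what is proved, stated in full; the proofs are below) =====
def Claim_equal_validate_puzzle : Prop := ∀ (puz : List (List Int)), Dom_validate_puzzle puz → Pre_validate_puzzle puz → Spec_validate_puzzle puz (validate_puzzle puz)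

-- ===== LEMMAS AND PROOFS =====

-- simple reference scanner: cons instead of append+sort
def vpChk (seen : List Int) (m : Int) : List Int → Option (List Int)
  | [] => some seen
  | e :: rest =>
    if seen.contains e || decide (e > m) then none
    else vpChk (e :: seen) m rest

theorem vpA_inner_chk (line : List Int) : ∀ (values seen : List Int) (m : Int),
    (∀ x, x ∈ values ↔ x ∈ seen) →
    (vpA_inner values m line = none ∧ vpChk seen m line = none) ∨
    (∃ v s, vpA_inner values m line = some v ∧ vpChk seen m line = some s ∧ (∀ x, x ∈ v ↔ x ∈ s)) := by
  induction line with
  | nil =>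
    intro values seen m h
    exact Or.inr ⟨values, seen, rfl, rfl, h⟩
  | cons e rest ih =>
    intro values seen m h
    by_cases hb : e ∈ seen ∨ m < e
    · left
      constructor
      · simp [vpA_inner, h e, hb]
      · simp [vpChk, hb]
    · have h' : ∀ x, (x ∈ PySem.List.sorted (values ++ [e]) (fun x => x) false) ↔ x ∈ e :: seen := by
        intro x
        rw [PySem.List.mem_sorted]
        simp [h x, or_comm]
      rcases ih (PySem.List.sorted (values ++ [e]) (fun x => x) false) (e :: seen) m h' with
        ⟨h1, h2⟩ | ⟨v, s, h1, h2, h3⟩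
      · left
        constructor
        · simp [vpA_inner, h e, hb, h1]
        · simp [vpChk, hb, h2]
      · right
        refine ⟨v, s, ?_, ?_, h3⟩
        · simp [vpA_inner, h e, hb, h1]
        · simp [vpChk, hb, h2]

theorem vpChk_append (l1 l2 : List Int) : ∀ (seen : List Int) (m : Int),
    vpChk seen m (l1 ++ l2) = (vpChk seen m l1).bind (fun s => vpChk s m l2) := by
  induction l1 with
  | nil => intro seen m; simp [vpChk]
  | cons e rest ih =>
    intro seen m
    by_cases hb : e ∈ seen ∨ m < e
    · simp [vpChk, hb]
    · simp [vpChk, hb, ih]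

theorem vpA_outer_chk (lines : List (List Int)) : ∀ (values seen : List Int) (m : Int),
    (∀ x, x ∈ values ↔ x ∈ seen) →
    vpA_outer values m lines = (vpChk seen m (lines.flatMap id)).isSome := by
  induction lines with
  | nil => intro values seen m _; simp [vpA_outer, vpChk]
  | cons line rest ih =>
    intro values seen m h
    rw [List.flatMap_cons, vpChk_append]
    rcases vpA_inner_chk line values seen m h with ⟨h1, h2⟩ | ⟨v, s, h1, h2, h3⟩
    · simp [vpA_outer, h1, h2]
    · simp only [vpA_outer, h1, h2, id, Option.bind_some]
      exact ih v s m h3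

theorem vpChk_isSome (l : List Int) : ∀ (seen : List Int) (m : Int),
    (vpChk seen m l).isSome = true ↔ (l.Nodup ∧ ∀ x ∈ l, x ∉ seen ∧ x ≤ m) := by
  induction l with
  | nil => intro seen m; simp [vpChk]
  | cons e rest ih =>
    intro seen m
    by_cases hb : e ∈ seen ∨ m < e
    · simp only [vpChk, List.contains_iff_mem]
      rw [if_pos (by simpa using hb)]
      simp only [Option.isSome_none, Bool.false_eq_true, false_iff]
      rintro ⟨_, hall⟩
      have := hall e (by simp)
      rcases hb with hb | hb
      · exact this.1 hb
      · omega
    · simp only [vpChk, List.contains_iff_mem]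
      rw [if_neg (by simpa using hb)]
      rw [ih]
      push Not at hb
      constructor
      · rintro ⟨hnd, hall⟩
        refine ⟨List.nodup_cons.mpr ⟨fun hmem => (hall e hmem).1 (by simp), hnd⟩, ?_⟩
        intro x hx
        rcases List.mem_cons.mp hx with rfl | hx
        · exact ⟨hb.1, by omega⟩
        · have := hall x hx
          simp only [List.mem_cons, not_or] at this
          exact ⟨this.1.2, this.2⟩
      · rintro ⟨hnd, hall⟩
        have hnd' := List.nodup_cons.mp hnd
        refine ⟨hnd'.2, ?_⟩
        intro x hx
        have := hall x (by simp [hx])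
        have hne : x ≠ e := fun hxe => hnd'.1 (hxe ▸ hx)
        simp only [List.mem_cons, not_or]
        exact ⟨⟨hne, this.1⟩, this.2⟩

theorem vpFoldl_add_length_le (l : List Int) : ∀ (s : List Int),
    (l.foldl PySem.Set.add s).length ≤ s.length + l.length := by
  induction l with
  | nil => intro s; simp
  | cons x rest ih =>
    intro s
    simp only [List.foldl_cons]
    refine le_trans (ih _) ?_
    by_cases h : x ∈ s
    · simp [PySem.Set.add, h]
    · simp [PySem.Set.add, h]
      omega

theorem vpFoldl_add_length (l : List Int) : ∀ (s : List Int),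
    ((l.foldl PySem.Set.add s).length = s.length + l.length) ↔ (l.Nodup ∧ ∀ x ∈ l, x ∉ s) := by
  induction l with
  | nil => intro s; simp
  | cons x rest ih =>
    intro s
    simp only [List.foldl_cons]
    by_cases hx : x ∈ s
    · have hadd : PySem.Set.add s x = s := by simp [PySem.Set.add, hx]
      rw [hadd]
      constructor
      · intro hlen
        have := vpFoldl_add_length_le rest s
        simp only [List.length_cons] at hlen
        omega
      · rintro ⟨_, hall⟩
        exact absurd hx (hall x (by simp))
    · have hadd : PySem.Set.add s x = s ++ [x] := by simp [PySem.Set.add, hx]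
      rw [hadd]
      rw [show s.length + (x :: rest).length = (s ++ [x]).length + rest.length by simp; omega]
      rw [ih (s ++ [x])]
      constructor
      · rintro ⟨hnd, hall⟩
        have hxr : x ∉ rest := fun hm => by
          have := hall x hm
          simp at this
        refine ⟨List.nodup_cons.mpr ⟨hxr, hnd⟩, ?_⟩
        intro y hy
        rcases List.mem_cons.mp hy with rfl | hy
        · exact hx
        · have := hall y hy
          simp only [List.mem_append, List.mem_singleton, not_or] at this
          exact this.1
      · rintro ⟨hnd, hall⟩
        have hnd' := List.nodup_cons.mp hnd
        refine ⟨hnd'.2, ?_⟩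
        intro y hy
        simp only [List.mem_append, List.mem_singleton, not_or]
        exact ⟨hall y (by simp [hy]), fun hyx => hnd'.1 (hyx ▸ hy)⟩

theorem vpOfList_length (l : List Int) :
    ((PySem.Set.ofList l).length = l.length) ↔ l.Nodup := by
  rw [PySem.Set.ofList_eq_foldl]
  have := vpFoldl_add_length l []
  simp only [List.length_nil, Nat.zero_add] at this
  rw [this]
  simp

theorem vpFoldl_append_eq_flatMap (lines : List (List Int)) : ∀ (acc : List Int),
    lines.foldl (fun acc row => acc ++ row) acc = acc ++ lines.flatMap id := by
  induction lines with
  | nil => intro acc; simp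
  | cons line rest ih =>
    intro acc
    simp [List.foldl_cons, ih, List.flatMap_cons]

-- ===== VERDICT (by name: the statement is the Claim_ definition above) =====
theorem validate_puzzle_spec : Claim_equal_validate_puzzle := by
  intro puz _ hpre
  unfold Spec_validate_puzzle
  match puz with
  | [] => exact absurd rfl hpre
  | first :: rest =>
    simp only [validate_puzzle, validate_puzzle_alt]
    set m : Int := (first.length : Int) * ((first :: rest).length : Int) - 1 with hm
    set flat : List Int := (first :: rest).flatMap id with hflat
    rw [vpFoldl_append_eq_flatMap, List.nil_append, ← hflat]
    rw [vpA_outer_chk (first :: rest) [] [] m (fun x => Iff.rfl)]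
    rw [Bool.eq_iff_iff]
    rw [vpChk_isSome]
    simp only [Bool.and_eq_true, beq_iff_eq, List.all_eq_true, decide_eq_true_iff]
    constructor
    · rintro ⟨hnd, hall⟩
      exact ⟨((vpOfList_length flat).mpr hnd).symm, fun e he => (hall e he).2⟩
    · rintro ⟨hlen, hall⟩
      exact ⟨(vpOfList_length flat).mp hlen.symm, fun x hx => ⟨by simp, hall x hx⟩⟩
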